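-- pv_equiv track=rewrite | github.com/gkontorousis/COMP-767 | dummy_mdl_scoring_science.py | parse_scienceworld_rollout
-- ===== SOURCE A (Python) =====
-- def parse_scienceworld_rollout(rollout_text: str):
--     """
--     Parses rollout text into a list of (action, observation) pairs.
--
--     Expected format:
--       > action
--       observation line 1
--       observation line 2
--       ...
--       > next action
--       next observation
--       ...
--
--     Returns:
--       pairs = [
--         {"action": "> look around", "observation": "This room is called ..."},
--         ...
--       ]
--     """
--     lines = rollout_text.splitlines()
--
--     pairs = []
--     current_action = None
--     current_observation_lines = []
--
--     for raw_line in lines: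
--         line = raw_line.rstrip()
--
--         if line.startswith("> "):
--             if current_action is not None:
--                 pairs.append({
--                     "action": current_action,
--                     "observation": "\n".join(current_observation_lines).strip(),
--                 })
--             current_action = line.strip()
--             current_observation_lines = []
--         else:
--             if current_action is None:
--                 # Ignore stray text before first action
--                 continue
--             current_observation_lines.append(line)
--
--     if current_action is not None:
--         pairs.append({
--             "action": current_action,
--             "observation": "\n".join(current_observation_lines).strip(),
--         })
--
--     return pairs
-- ===== SOURCE B (Python) =====
-- def parse_scienceworld_rollout(rollout_text: str):
--     """Parse rollout text into action/observation pairs by slicing between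
--     action-marker line indices instead of maintaining running accumulator state."""
--     lines = [l.rstrip() for l in rollout_text.splitlines()]
--     marked = [(i, l) for i, l in enumerate(lines) if l.startswith("> ")]
--     ends = [i for i, _ in marked][1:] + [len(lines)]
--     return [{"action": l.strip(),
--              "observation": "\n".join(lines[i + 1:j]).strip()}
--             for (i, l), j in zip(marked, ends)]
-- ===== Notes on version B (the rewrite author's own statement) =====
-- stated objective: alternative
-- what changed: Replaces A's single pass with running accumulator state (current action, observation buffer, flush on next marker and at end) by an index-based decomposition: collect the action-marker line indices once, then build each pair directly from the slice of lines between consecutive marker indices.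
import Mathlib
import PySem

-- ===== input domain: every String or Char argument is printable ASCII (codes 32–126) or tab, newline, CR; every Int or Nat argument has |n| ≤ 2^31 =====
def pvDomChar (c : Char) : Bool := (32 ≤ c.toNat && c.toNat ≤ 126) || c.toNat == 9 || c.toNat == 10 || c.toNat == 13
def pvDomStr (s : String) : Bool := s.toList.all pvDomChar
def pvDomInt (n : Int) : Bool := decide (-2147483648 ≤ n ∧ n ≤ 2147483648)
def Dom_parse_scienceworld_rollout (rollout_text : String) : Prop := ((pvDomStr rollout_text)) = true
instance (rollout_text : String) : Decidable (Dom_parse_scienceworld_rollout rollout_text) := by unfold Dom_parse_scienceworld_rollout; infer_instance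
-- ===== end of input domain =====

-- B replaces A's running accumulator state (current action / observation buffer / flush-at-end)
-- by index slicing: collect the indices of action-marker lines once, then build each pair from
-- the slice of lines between consecutive marker indices.  Objective: alternative decomposition.

-- ===== PORT A =====
-- A's for-loop, transliterated as structural recursion over the remaining lines with the same
-- state (pairs so far, optional current action, accumulated observation lines); the trailing
-- 'if current_action is not None: append' is the [] case.
def pvLoopA (ls : List String) (pairs : List (List (String × String)))
    (cur : Option String) (obs : List String) : List (List (String × String)) :=
  match ls with
  | [] =>
    match cur with
    | some a => pairs ++ [[("action", a), ("observation", PySem.Str.strip (PySem.Str.join "\n" obs))]]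
    | none => pairs
  | raw :: rest =>
    let line := PySem.Str.rstrip raw
    if PySem.Str.startswith line "> " then
      let pairs' :=
        match cur with
        | some a => pairs ++ [[("action", a), ("observation", PySem.Str.strip (PySem.Str.join "\n" obs))]]
        | none => pairs
      pvLoopA rest pairs' (some (PySem.Str.strip line)) []
    else
      match cur with
      | none => pvLoopA rest pairs none obs
      | some a => pvLoopA rest pairs (some a) (obs ++ [line])

def parse_scienceworld_rollout (rollout_text : String) : List (List (String × String)) :=
  pvLoopA (PySem.Str.splitlines rollout_text) [] none []

-- ===== PORT B =====
def parse_scienceworld_rollout_alt (rollout_text : String) : List (List (String × String)) :=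
  let lines := (PySem.Str.splitlines rollout_text).map PySem.Str.rstrip
  let marked := (PySem.List.enumerate lines 0).filter (fun p => PySem.Str.startswith p.2 "> ")
  let ends := (marked.map Prod.fst).drop 1 ++ [(lines.length : Int)]
  (marked.zip ends).map (fun q =>
    [("action", PySem.Str.strip q.1.2),
     ("observation", PySem.Str.strip (PySem.Str.join "\n"
        (PySem.List.slice lines (some (q.1.1 + 1)) (some q.2))))])

-- ===== PRECONDITION & SPEC =====
def Spec_parse_scienceworld_rollout (rollout_text : String) (out : List (List (String × String))) : Prop := out = parse_scienceworld_rollout_alt rollout_text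
instance (rollout_text : String) (out : List (List (String × String))) : Decidable (Spec_parse_scienceworld_rollout rollout_text out) := by unfold Spec_parse_scienceworld_rollout; infer_instance

-- ===== CLAIM (what is proved, stated in full; the proofs are below) =====
def Claim_equal_parse_scienceworld_rollout : Prop := ∀ (rollout_text : String), Dom_parse_scienceworld_rollout rollout_text → Spec_parse_scienceworld_rollout rollout_text (parse_scienceworld_rollout rollout_text)

-- ===== LEMMAS AND PROOFS =====

-- whether an (already-rstripped) line is an action marker
def pvAct (l : String) : Bool := PySem.Str.startswith l "> "

-- clean characterization both ports are proved equal to, on the rstripped lines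
def pvSegs : List String → List (List (String × String))
  | [] => []
  | l :: ls =>
    if pvAct l then
      [("action", PySem.Str.strip l),
       ("observation", PySem.Str.strip (PySem.Str.join "\n" (ls.takeWhile (fun x => !pvAct x))))]
        :: pvSegs ls
    else pvSegs ls

-- the body of B's comprehension and B's zip-map core, named for the proofs
def pvFB (lines : List String) (q : (Int × String) × Int) : List (String × String) :=
  [("action", PySem.Str.strip q.1.2),
   ("observation", PySem.Str.strip (PySem.Str.join "\n"
      (PySem.List.slice lines (some (q.1.1 + 1)) (some q.2))))]

def pvCoreB (lines : List String) (M : List (Int × String)) (te : Int) : List (List (String × String)) :=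
  (M.zip ((M.map Prod.fst).drop 1 ++ [te])).map (pvFB lines)

lemma pvAct_eq (l : String) : PySem.Str.startswith l "> " = pvAct l := rfl

lemma pvSegs_dropWhile (ls : List String) :
    pvSegs (ls.dropWhile (fun x => !pvAct x)) = pvSegs ls := by
  induction ls with
  | nil => rfl
  | cons l ls ih =>
    cases h : pvAct l
    · simp [h, pvSegs, ih]
    · simp [h, pvSegs]

-- A's loop with a current action flushes that action with the observation lines up to the
-- next marker, then continues as pvSegs
lemma pvLoopA_some (ls : List String) (acc : List (List (String × String))) (a : String) (obs : List String) :
    pvLoopA ls acc (some a) obs =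
      acc ++ ([("action", a),
               ("observation", PySem.Str.strip (PySem.Str.join "\n"
                  (obs ++ (ls.map PySem.Str.rstrip).takeWhile (fun x => !pvAct x))))]
        :: pvSegs ((ls.map PySem.Str.rstrip).dropWhile (fun x => !pvAct x))) := by
  induction ls generalizing acc a obs with
  | nil => simp only [pvLoopA, List.map_nil, List.takeWhile_nil, List.dropWhile_nil, pvSegs,
      List.append_nil]
  | cons raw rest ih =>
    cases h : pvAct (PySem.Str.rstrip raw)
    · simp only [pvLoopA, pvAct_eq, h, Bool.false_eq_true, if_false]
      rw [ih]
      simp [h]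
    · simp only [pvLoopA, pvAct_eq, h, if_true]
      rw [ih]
      simp [pvSegs, h, pvSegs_dropWhile, List.append_assoc]

lemma pvLoopA_none (ls : List String) (acc : List (List (String × String))) (obs : List String) :
    pvLoopA ls acc none obs = acc ++ pvSegs (ls.map PySem.Str.rstrip) := by
  induction ls generalizing acc obs with
  | nil => simp [pvLoopA, pvSegs]
  | cons raw rest ih =>
    cases h : pvAct (PySem.Str.rstrip raw)
    · simp only [pvLoopA, pvAct_eq, h, Bool.false_eq_true, if_false]
      rw [ih]
      simp [pvSegs, h]
    · simp only [pvLoopA, pvAct_eq, h, if_true]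
      rw [pvLoopA_some]
      simp [pvSegs, h, pvSegs_dropWhile]

-- ==== B side ====

lemma pvEnumerate_shift {α : Type} (xs : List α) (s : Int) :
    PySem.List.enumerate xs (s + 1) = (PySem.List.enumerate xs s).map (fun p => (p.1 + 1, p.2)) := by
  induction xs generalizing s with
  | nil => simp [PySem.List.enumerate_nil]
  | cons x xs ih =>
    rw [PySem.List.enumerate_cons, PySem.List.enumerate_cons, List.map_cons, ih]

lemma pvSlice_cons {α : Type} (x : α) (xs : List α) (a b : Int) (ha : 0 ≤ a) (hb : 0 ≤ b) :
    PySem.List.slice (x :: xs) (some (a + 1)) (some (b + 1)) = PySem.List.slice xs (some a) (some b) := by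
  rw [PySem.List.slice_toNat _ (by omega) (by omega), PySem.List.slice_toNat _ ha hb]
  have h1 : (a + 1).toNat = a.toNat + 1 := by omega
  have h2 : (b + 1).toNat = b.toNat + 1 := by omega
  simp [h1, h2]

lemma pvHeadD_fsts (ls : List String) (s : Int) :
    ((((PySem.List.enumerate ls s).filter (fun p => pvAct p.2)).map Prod.fst).headD (s + ls.length)) =
      s + ((ls.takeWhile (fun x => !pvAct x)).length : Int) := by
  induction ls generalizing s with
  | nil => simp
  | cons l ls ih =>
    cases h : pvAct l
    · rw [PySem.List.enumerate_cons, List.filter_cons,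
        if_neg (by simp [show pvAct ((s : Int), l).2 = false from h]),
        show s + (((l :: ls).length : Nat) : Int) = (s + 1) + ls.length by
          rw [List.length_cons]; push_cast; ring,
        ih (s + 1), List.takeWhile_cons, if_pos (by simp [h])]
      simp only [List.length_cons]; push_cast; ring
    · simp [PySem.List.enumerate_cons, h]

lemma pvZip_cons_structure {α : Type} (x : α × String) (M : List (α × String)) (te : α) :
    (x :: M).zip ((M.map Prod.fst) ++ [te]) =
      (x, (M.map Prod.fst).headD te) :: M.zip ((M.map Prod.fst).drop 1 ++ [te]) := by
  cases M with
  | nil => simp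
  | cons m M' => simp [List.zip]

lemma pvCoreB_cons (lines : List String) (x : Int × String) (M : List (Int × String)) (te : Int) :
    pvCoreB lines (x :: M) te =
      pvFB lines (x, (M.map Prod.fst).headD te) :: pvCoreB lines M te := by
  unfold pvCoreB
  rw [show ((x :: M).map Prod.fst).drop 1 = M.map Prod.fst by simp,
    pvZip_cons_structure, List.map_cons]

lemma pvNonneg_mem_enum_filter {p : Int × String}
    {ls : List String} (hp : p ∈ (PySem.List.enumerate ls 0).filter (fun q => pvAct q.2)) : 0 ≤ p.1 := by
  have := List.mem_of_mem_filter hp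
  rw [PySem.List.mem_enumerate_iff] at this
  obtain ⟨k, hk, rfl⟩ := this
  simp

lemma pvCoreB_shift (l : String) (ls : List String) (M : List (Int × String)) (te : Int)
    (hte : 0 ≤ te) (hM : ∀ p ∈ M, 0 ≤ p.1) :
    pvCoreB (l :: ls) (M.map (fun p => (p.1 + 1, p.2))) (te + 1) = pvCoreB ls M te := by
  unfold pvCoreB
  have hE : ((M.map (fun p : Int × String => (p.1 + 1, p.2))).map Prod.fst).drop 1 ++ [te + 1] =
      ((M.map Prod.fst).drop 1 ++ [te]).map (fun j => j + 1) := by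
    simp [List.map_map, Function.comp_def]
  rw [hE]
  have hzip : (M.map (fun p : Int × String => (p.1 + 1, p.2))).zip
      (((M.map Prod.fst).drop 1 ++ [te]).map (fun j => j + 1)) =
      (M.zip ((M.map Prod.fst).drop 1 ++ [te])).map
        (Prod.map (fun p : Int × String => (p.1 + 1, p.2)) (fun j => j + 1)) := by
    rw [List.zip_map]
  rw [hzip, List.map_map]
  apply List.map_congr_left
  intro q hq
  have hq1 : q.1 ∈ M := List.of_mem_zip hq |>.1
  have hq2 : q.2 ∈ (M.map Prod.fst).drop 1 ++ [te] := List.of_mem_zip hq |>.2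
  have hi : 0 ≤ q.1.1 := hM _ hq1
  have hj : 0 ≤ q.2 := by
    rcases List.mem_append.mp hq2 with h | h
    · have : q.2 ∈ M.map Prod.fst := List.mem_of_mem_drop h
      obtain ⟨p, hp, he⟩ := List.mem_map.mp this
      exact he ▸ hM _ hp
    · simp at h; omega
  simp only [Function.comp, pvFB, Prod.map]
  have : PySem.List.slice (l :: ls) (some (q.1.1 + 1 + 1)) (some (q.2 + 1)) =
      PySem.List.slice ls (some (q.1.1 + 1)) (some q.2) := by
    have := pvSlice_cons l ls (q.1.1 + 1) q.2 (by omega) hj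
    simpa using this
  simp [this]

lemma pvTake_takeWhile {α : Type} (p : α → Bool) (ls : List α) :
    ls.take (ls.takeWhile p).length = ls.takeWhile p :=
  ((List.prefix_iff_eq_take.mp (List.takeWhile_prefix p)).symm)

lemma pvCoreB_eq_segs (ls : List String) :
    pvCoreB ls ((PySem.List.enumerate ls 0).filter (fun p => pvAct p.2)) (ls.length : Int) = pvSegs ls := by
  induction ls with
  | nil => simp [pvCoreB, PySem.List.enumerate_nil, pvSegs]
  | cons l ls ih =>
    have hshift : PySem.List.enumerate ls (0 + 1) = (PySem.List.enumerate ls 0).map (fun p => (p.1 + 1, p.2)) :=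
      pvEnumerate_shift ls 0
    have hfilter : ((PySem.List.enumerate ls 0).map (fun p : Int × String => (p.1 + 1, p.2))).filter
        (fun p => pvAct p.2) =
        ((PySem.List.enumerate ls 0).filter (fun p => pvAct p.2)).map (fun p => (p.1 + 1, p.2)) := by
      rw [List.filter_map]; rfl
    set M := (PySem.List.enumerate ls 0).filter (fun p => pvAct p.2) with hMdef
    have hMnn : ∀ p ∈ M, 0 ≤ p.1 := fun p hp => pvNonneg_mem_enum_filter hp
    have hlen : (((l :: ls).length : Nat) : Int) = (ls.length : Int) + 1 := by
      rw [List.length_cons]; push_cast; ring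
    cases h : pvAct l
    · -- head is not an action marker
      have hMarked : (PySem.List.enumerate (l :: ls) 0).filter (fun p => pvAct p.2) =
          M.map (fun p => (p.1 + 1, p.2)) := by
        rw [PySem.List.enumerate_cons, List.filter_cons,
          if_neg (by simp [show pvAct ((0 : Int), l).2 = false from h]), hshift, hfilter]
      rw [hMarked, hlen, pvCoreB_shift l ls M (ls.length : Int) (by positivity) hMnn, ih]
      simp [pvSegs, h]
    · -- head is an action marker
      have hMarked : (PySem.List.enumerate (l :: ls) 0).filter (fun p => pvAct p.2) =
          (0, l) :: M.map (fun p => (p.1 + 1, p.2)) := by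
        rw [PySem.List.enumerate_cons, List.filter_cons,
          if_pos (by simp [show pvAct ((0 : Int), l).2 = true from h]), hshift, hfilter]
      rw [hMarked, hlen, pvCoreB_cons,
        pvCoreB_shift l ls M (ls.length : Int) (by positivity) hMnn, ih]
      have hheadD : ((M.map (fun p : Int × String => (p.1 + 1, p.2))).map Prod.fst).headD ((ls.length : Int) + 1) =
          ((ls.takeWhile (fun x => !pvAct x)).length : Int) + 1 := by
        have hh := pvHeadD_fsts ls 0
        rw [← hMdef] at hh
        cases hM' : M.map Prod.fst with
        | nil =>
          have hMnil : M = [] := by simpa using hM'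
          rw [hMnil, List.map_nil, List.headD_nil] at hh
          rw [hMnil]
          simp only [List.map_nil, List.headD_nil]
          omega
        | cons i rest =>
          have h1 : (M.map (fun p : Int × String => (p.1 + 1, p.2))).map Prod.fst =
              (M.map Prod.fst).map (fun i => i + 1) := by simp [List.map_map, Function.comp_def]
          rw [h1, hM']
          rw [hM'] at hh
          simp only [List.map_cons, List.headD_cons] at hh ⊢
          omega
      rw [hheadD]
      have hslice : PySem.List.slice (l :: ls) (some ((0 : Int) + 1))
          (some (((ls.takeWhile (fun x => !pvAct x)).length : Int) + 1)) =
          ls.takeWhile (fun x => !pvAct x) := by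
        rw [pvSlice_cons l ls 0 _ le_rfl (by positivity),
          PySem.List.slice_toNat _ (by omega) (by omega)]
        simp [pvTake_takeWhile]
      norm_num at hslice
      show pvFB (l :: ls) ((0, l), _) :: pvSegs ls = pvSegs (l :: ls)
      simp [pvFB, hslice, pvSegs, h]

lemma pvAlt_eq_segs (t : String) :
    parse_scienceworld_rollout_alt t = pvSegs ((PySem.Str.splitlines t).map PySem.Str.rstrip) := by
  unfold parse_scienceworld_rollout_alt
  have := pvCoreB_eq_segs ((PySem.Str.splitlines t).map PySem.Str.rstrip)
  unfold pvCoreB pvFB pvAct at this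
  simpa using this

-- ===== VERDICT (by name: the statement is the Claim_ definition above) =====
theorem parse_scienceworld_rollout_spec : Claim_equal_parse_scienceworld_rollout := by
  intro t _
  unfold Spec_parse_scienceworld_rollout parse_scienceworld_rollout
  rw [pvLoopA_none, pvAlt_eq_segs]
  simp
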